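-- pv_equiv track=rewrite | github.com/Gigers/revisor | 3_semestre/estrutura_de_dados/algoritimos/Python/estrutura_dado_raspado/util.py | genValues
-- ===== SOURCE A (Python) =====
-- def genValues(valores):
--
--     temp = ''
--     dinheiros = []
--
--     for i in valores:
--         if(i != ' '):
--             temp += i
--         else:
--             dinheiros.append(temp)
--             temp = ''
--
--     return dinheiros
-- ===== SOURCE B (Python) =====
-- def genValues(valores):
--     return valores.split(' ')[:-1]
-- ===== Notes on version B (the rewrite author's own statement) =====
-- stated objective: idiomatic
-- what changed: Replaces the character-by-character accumulator loop with a single expression: split on the space separator and drop the last segment.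
import Mathlib
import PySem

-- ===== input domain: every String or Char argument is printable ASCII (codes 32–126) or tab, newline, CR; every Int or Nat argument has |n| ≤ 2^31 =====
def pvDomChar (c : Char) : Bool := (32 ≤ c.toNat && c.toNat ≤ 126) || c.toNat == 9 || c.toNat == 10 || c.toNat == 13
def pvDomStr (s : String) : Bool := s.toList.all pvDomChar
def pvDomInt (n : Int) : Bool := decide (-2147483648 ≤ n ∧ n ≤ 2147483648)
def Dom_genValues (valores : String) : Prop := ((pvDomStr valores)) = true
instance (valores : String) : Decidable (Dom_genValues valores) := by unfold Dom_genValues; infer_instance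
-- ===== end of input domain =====

-- B replaces A's character-by-character accumulator loop with the builtin split followed by dropping the last segment (idiomatic; a timing run measured it faster by a constant factor).


-- ===== PORT A =====
-- literal port: fold over the characters with state (temp, dinheiros)
def genValues (valores : String) : List String :=
  (valores.toList.foldl
    (fun (st : String × List String) i =>
      if i ≠ ' ' then (st.1.push i, st.2)
      else ("", st.2 ++ [st.1]))
    ("", [])).2

-- ===== PORT B =====
-- literal port of Source B: valores.split(' ')[:-1]
def genValues_alt (valores : String) : List String :=
  PySem.List.slice ((PySem.Chars.splitOn valores.toList [' ']).map String.ofList) none (some (-1))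

-- ===== PRECONDITION & SPEC =====
def Spec_genValues (valores : String) (out : List String) : Prop := out = genValues_alt valores
instance (valores : String) (out : List String) : Decidable (Spec_genValues valores out) := by unfold Spec_genValues; infer_instance

-- ===== CLAIM (what is proved, stated in full; the proofs are below) =====
def Claim_equal_genValues : Prop := ∀ (valores : String), Dom_genValues valores → Spec_genValues valores (genValues valores)

-- ===== LEMMAS AND PROOFS =====

-- structural characterisation of splitting on a single space
def splitSp : List Char → List Char → List (List Char)
  | [], cur => [cur.reverse]
  | c :: rest, cur => if c = ' ' then cur.reverse :: splitSp rest [] else splitSp rest (c :: cur)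

theorem splitSp_ne_nil (l cur : List Char) : splitSp l cur ≠ [] := by
  induction l generalizing cur with
  | nil => simp [splitSp]
  | cons c rest ih =>
    simp only [splitSp]
    split
    · simp
    · exact ih _

theorem go_eq_splitSp (l : List Char) (fuel : Nat) (cur : List Char) (acc : List (List Char))
    (h : l.length ≤ fuel) :
    PySem.Chars.splitOn.go [' '] fuel l cur acc = acc.reverse ++ splitSp l cur := by
  induction fuel generalizing l cur acc with
  | zero =>
    have hl : l = [] := List.eq_nil_of_length_eq_zero (Nat.le_zero.mp h)
    subst hl
    simp [PySem.Chars.splitOn.go, splitSp]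
  | succ n ih =>
    cases l with
    | nil => simp [PySem.Chars.splitOn.go, splitSp]
    | cons c rest =>
      simp only [PySem.Chars.splitOn.go, splitSp]
      by_cases hc : c = ' '
      · subst hc
        rw [if_pos (by simp [List.isPrefixOf]), if_pos rfl]
        rw [ih _ _ _ (by simpa using Nat.le_of_succ_le_succ h)]
        simp
      · rw [if_neg (by simp [List.isPrefixOf, Ne.symm hc]), if_neg hc]
        exact ih _ _ _ (by simpa using Nat.le_of_succ_le_succ h)

theorem splitOn_eq_splitSp (l : List Char) :
    PySem.Chars.splitOn l [' '] = splitSp l [] := by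
  unfold PySem.Chars.splitOn
  simpa using go_eq_splitSp l (l.length + 1) [] [] (Nat.le_succ _)

theorem foldA_eq (l : List Char) (cur : List Char) (d : List String) :
    (l.foldl
      (fun (st : String × List String) i =>
        if i ≠ ' ' then (st.1.push i, st.2)
        else ("", st.2 ++ [st.1]))
      (String.ofList cur.reverse, d)).2
    = d ++ ((splitSp l cur).dropLast.map String.ofList) := by
  induction l generalizing cur d with
  | nil => simp [splitSp]
  | cons c rest ih =>
    by_cases hc : c = ' '
    · subst hc
      simp only [List.foldl_cons, ne_eq, not_true_eq_false, if_false]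
      have := ih [] (d ++ [String.ofList cur.reverse])
      simp only [List.reverse_nil] at this
      rw [show (String.ofList [] : String) = "" from rfl] at this
      rw [this]
      have hne := splitSp_ne_nil rest []
      simp [splitSp, List.dropLast_cons_of_ne_nil hne]
    · simp only [List.foldl_cons, ne_eq, hc, not_false_eq_true, if_pos]
      have hpush : (String.ofList cur.reverse).push c = String.ofList (c :: cur).reverse := by
        apply String.toList_injective; simp
      rw [hpush, ih (c :: cur) d]
      simp [splitSp, hc]

theorem sliceNeg1 (xs : List String) :
    PySem.List.slice xs none (some (-1)) = xs.dropLast := by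
  rcases xs with _ | ⟨x, rest⟩
  · simp [PySem.List.slice]
  · simp [PySem.List.slice, List.dropLast_eq_take]

-- ===== VERDICT (by name: the statement is the Claim_ definition above) =====
theorem genValues_spec : Claim_equal_genValues := by
  intro valores _
  unfold Spec_genValues genValues genValues_alt
  rw [splitOn_eq_splitSp, sliceNeg1]
  have := foldA_eq valores.toList [] []
  simpa using this
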